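-- pv_equiv track=rewrite | github.com/ungseo/TIL | Algorithm/Python/Baekjun/리모컨.py | find_possible
-- ===== SOURCE A (Python) =====
-- def find_possible(number, broken):
--     if number == 0:
--         return 0
--     cnt = 0
--     while number > 0:
--         digit = number % 10
--         if digit in broken:
--             return None
--         cnt += 1
--         number //= 10
--     return cnt
-- ===== SOURCE B (Python) =====
-- def find_possible(number, broken):
--     if number <= 0:
--         return 0
--     s = str(number)
--     if any(ord(c) - 48 in broken for c in s):
--         return None
--     return len(s)
-- ===== Notes on version B (the rewrite author's own statement) =====
-- stated objective: idiomatic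
-- what changed: B replaces A's fused modulo-extraction-and-count while-loop with a guard for non-positive input, a membership scan over the digits of str(number), and len(str(number)) for the count.
import Mathlib
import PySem

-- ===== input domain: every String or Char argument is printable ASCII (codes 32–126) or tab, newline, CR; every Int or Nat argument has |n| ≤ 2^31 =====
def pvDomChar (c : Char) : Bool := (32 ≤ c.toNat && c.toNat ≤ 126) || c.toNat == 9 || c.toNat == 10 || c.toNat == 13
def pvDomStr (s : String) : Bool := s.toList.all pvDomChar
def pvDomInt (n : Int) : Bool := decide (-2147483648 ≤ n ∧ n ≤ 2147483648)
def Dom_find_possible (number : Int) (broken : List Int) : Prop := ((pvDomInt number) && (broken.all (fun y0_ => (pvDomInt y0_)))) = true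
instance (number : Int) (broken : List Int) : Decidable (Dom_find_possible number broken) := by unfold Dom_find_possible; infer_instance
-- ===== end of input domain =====

-- B replaces A's fused modulo-extraction-and-count loop with a scan over the decimal string and its length (idiomatic, not faster).

-- ===== PORT A =====
-- A's `while number > 0` loop: digit = number % 10; early None on broken digit; cnt += 1; number //= 10.
def pvLoopA (number : Int) (broken : List Int) (cnt : Int) : Option Int :=
  if h : 0 < number then
    let digit := PySem.Int.mod number 10
    if broken.contains digit then none
    else pvLoopA (PySem.Int.floordiv number 10) broken (cnt + 1)
  else some cnt
termination_by number.toNat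
decreasing_by
  rw [PySem.Int.floordiv_eq_ediv_of_pos (by norm_num)]
  omega

def find_possible (number : Int) (broken : List Int) : Option Int :=
  if number = 0 then some 0
  else pvLoopA number broken 0

-- ===== PORT B =====
-- Source B: guard number <= 0; s = str(number); any(ord(c) - 48 in broken for c in s) → None; else len(s).
def find_possible_alt (number : Int) (broken : List Int) : Option Int :=
  if number ≤ 0 then some 0
  else
    let s := PySem.Int.toStr number
    if s.toList.any (fun c => broken.contains ((c.toNat : Int) - 48)) then none
    else some (PySem.Str.len s)

-- ===== PRECONDITION & SPEC =====
def Spec_find_possible (number : Int) (broken : List Int) (out : Option Int) : Prop := out = find_possible_alt number broken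
instance (number : Int) (broken : List Int) (out : Option Int) : Decidable (Spec_find_possible number broken out) := by unfold Spec_find_possible; infer_instance

-- ===== CLAIM (what is proved, stated in full; the proofs are below) =====
def Claim_equal_find_possible : Prop := ∀ (number : Int) (broken : List Int), Dom_find_possible number broken → Spec_find_possible number broken (find_possible number broken)

-- ===== LEMMAS AND PROOFS =====

-- For a decimal digit d, ord(digitChar d) - 48 recovers d.
lemma pv_digitChar_toNat (d : Nat) (h : d < 10) :
    ((Nat.digitChar d).toNat : Int) - 48 = (d : Int) := by
  interval_cases d <;> decide

-- Core's fuel-based printer, characterised by Mathlib's Nat.digits (most-significant first).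
lemma pv_toDigitsCore_eq (n : Nat) (hn : 0 < n) :
    ∀ (fuel : Nat) (ds : List Char), n < fuel →
      Nat.toDigitsCore 10 fuel n ds = ((Nat.digits 10 n).map Nat.digitChar).reverse ++ ds := by
  induction n using Nat.strong_induction_on with
  | _ n ih =>
    intro fuel ds hf
    cases fuel with
    | zero => omega
    | succ f =>
      rw [Nat.toDigitsCore]
      by_cases h0 : n / 10 = 0
      · simp only [h0, if_pos]
        rw [Nat.digits_def' (by norm_num) hn, h0]
        simp
      · simp only [if_neg h0]
        have hpos : 0 < n / 10 := Nat.pos_of_ne_zero h0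
        have hlt : n / 10 < n := Nat.div_lt_self hn (by norm_num)
        rw [ih (n / 10) hlt hpos f _ (by omega)]
        rw [Nat.digits_def' (by norm_num) hn]
        simp

lemma pv_toChars_pos (n : Int) (hn : 0 < n) :
    PySem.Int.toChars n = ((Nat.digits 10 n.toNat).map Nat.digitChar).reverse := by
  have h1 : ¬ n < 0 := by omega
  have h2 : 0 < n.toNat := by omega
  simp only [PySem.Int.toChars, if_neg h1, Nat.toDigits]
  rw [pv_toDigitsCore_eq n.toNat h2 (n.toNat + 1) [] (by omega)]
  simp

-- A's loop over a positive number, in terms of the digit list of Nat.digits.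
lemma pv_loopA_eq (broken : List Int) :
    ∀ (m : Nat), 0 < m → ∀ (cnt : Int),
      pvLoopA (m : Int) broken cnt =
        (if (Nat.digits 10 m).any (fun d => broken.contains (d : Int)) then none
         else some (cnt + ((Nat.digits 10 m).length : Int))) := by
  intro m
  induction m using Nat.strong_induction_on with
  | _ m ih =>
    intro hm cnt
    rw [pvLoopA]
    have hpos : (0 : Int) < (m : Int) := by exact_mod_cast hm
    have hmod : PySem.Int.mod ((m : Int)) 10 = ((m % 10 : Nat) : Int) := by
      rw [PySem.Int.mod_eq_emod_of_pos (by norm_num)]; omega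
    have hdiv : PySem.Int.floordiv ((m : Int)) 10 = ((m / 10 : Nat) : Int) := by
      rw [PySem.Int.floordiv_eq_ediv_of_pos (by norm_num)]; omega
    rw [dif_pos hpos, hmod, hdiv]
    rw [Nat.digits_def' (by norm_num) hm, List.any_cons]
    by_cases hb : broken.contains ((m % 10 : Nat) : Int)
    · rw [if_pos hb, if_pos (by rw [hb]; simp)]
    · have hb0 : broken.contains ((m % 10 : Nat) : Int) = false := by
        simpa using hb
      rw [if_neg hb, hb0, Bool.false_or]
      by_cases h0 : m / 10 = 0
      · rw [h0]
        rw [pvLoopA]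
        norm_num
      · have hpos' : 0 < m / 10 := Nat.pos_of_ne_zero h0
        have hlt : m / 10 < m := Nat.div_lt_self hm (by norm_num)
        rw [ih (m / 10) hlt hpos' (cnt + 1)]
        by_cases ha : (Nat.digits 10 (m / 10)).any (fun d => broken.contains (d : Int))
        · rw [if_pos ha, if_pos ha]
        · rw [if_neg ha, if_neg ha, List.length_cons]
          congr 1
          push_cast
          ring

-- The char-level broken test equals the digit-level test, given all digits < 10.
lemma pv_any_chars (broken : List Int) :
    ∀ (L : List Nat), (∀ d ∈ L, d < 10) →
      (L.map Nat.digitChar).reverse.any (fun c => broken.contains ((c.toNat : Int) - 48))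
        = L.any (fun d => broken.contains (d : Int)) := by
  intro L
  induction L with
  | nil => intro _; simp
  | cons d t ihl =>
    intro hlt
    have hd := pv_digitChar_toNat d (hlt d (by simp))
    simp only [List.map_cons, List.reverse_cons, List.any_append, List.any_cons,
      List.any_nil, Bool.or_false]
    rw [hd, ihl (fun x hx => hlt x (by simp [hx]))]
    exact Bool.or_comm _ _

-- ===== VERDICT (by name: the statement is the Claim_ definition above) =====
theorem find_possible_spec : Claim_equal_find_possible := by
  intro number broken _
  unfold Spec_find_possible find_possible find_possible_alt
  by_cases hle : number ≤ 0
  · rw [if_pos hle]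
    by_cases h0 : number = 0
    · rw [if_pos h0]
    · rw [if_neg h0, pvLoopA, dif_neg (by omega)]
  · rw [if_neg hle]
    have hlt : 0 < number := by omega
    have hm : 0 < number.toNat := by omega
    have hcast : ((number.toNat : Int)) = number := Int.toNat_of_nonneg (by omega)
    rw [if_neg (by omega)]
    simp only [PySem.Str.len_eq, PySem.Int.toList_toStr]
    rw [pv_toChars_pos number hlt]
    rw [pv_any_chars broken _ (fun d hd => Nat.digits_lt_base (by norm_num) hd)]
    have hloop := pv_loopA_eq broken number.toNat hm 0
    rw [hcast] at hloop
    rw [hloop]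
    by_cases ha : (Nat.digits 10 number.toNat).any (fun d => broken.contains (d : Int))
    · rw [if_pos ha, if_pos ha]
    · rw [if_neg ha, if_neg ha, zero_add]
      simp
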